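-- pv_equiv track=rewrite | github.com/Priyankas007/appointment_recorder | app.py | naive_placeholder_summary
-- ===== SOURCE A (Python) =====
-- import textwrap
-- from typing import List, Tuple, Dict, Any
--
-- def naive_placeholder_summary(combined_text: str, file_count: int) -> str:
--     """Return a simple placeholder summary when no API key is available or API call fails.
--
--     Performs a naive pass to pull out rough signals like diagnoses, meds, allergies.
--     """
--     sample = combined_text[:1200].replace("\n\n", "\n")
--     lines = [l.strip() for l in sample.splitlines() if l.strip()]
--
--     def grep(keys: List[str]) -> List[str]:
--         hits: List[str] = []
--         for line in lines:
--             low = line.lower()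
--             if any(k in low for k in keys):
--                 hits.append(line)
--         return hits[:8]
--
--     diagnoses = grep(["diag", "dx", "impression", "assessment"])
--     meds = grep(["med", "rx", "prescrib", "dosage"])
--     allergies = grep(["allerg", "reaction"])
--     procedures = grep(["procedure", "surgery", "operation"])
--
--     diagnoses_text = '\n'.join('- ' + d for d in diagnoses) or '- (none detected in sample)'
--     meds_text = '\n'.join('- ' + m for m in meds) or '- (none detected in sample)'
--     allergies_text = '\n'.join('- ' + a for a in allergies) or '- (none detected in sample)'
--     procedures_text = '\n'.join('- ' + p for p in procedures) or '- (none detected in sample)'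
--
--     return textwrap.dedent(
--         f"""
--         Placeholder health summary (no API key detected). Processed {file_count} PDF file(s).
--
--         High-level overview:
--         - The records include multiple visits and findings. This is only a rough, automated draft.
--
--         Possible diagnoses/assessments noted:
--         {diagnoses_text}
--
--         Possible medications mentioned:
--         {meds_text}
--
--         Possible allergies:
--         {allergies_text}
--
--         Possible procedures:
--         {procedures_text}
--
--         Next steps:
--         - Provide an OPENAI_API_KEY to enable an AI-generated, plain-language health history summary.
--         - Verify details directly in the source PDFs before using clinically.
--         """
--     ).strip()
-- ===== SOURCE B (Python) =====
-- import textwrap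
--
-- _SECTIONS = [
--     ["diag", "dx", "impression", "assessment"],
--     ["med", "rx", "prescrib", "dosage"],
--     ["allerg", "reaction"],
--     ["procedure", "surgery", "operation"],
-- ]
--
--
-- def naive_placeholder_summary(combined_text: str, file_count: int) -> str:
--     """Single fused pass: one scan over the lines fills all four capped buckets
--     at once (instead of four separate grep passes), lowercasing each line once."""
--     sample = combined_text[:1200].replace("\n\n", "\n")
--     lines = list(filter(None, map(str.strip, sample.splitlines())))
--
--     buckets = [[] for _ in _SECTIONS]
--     for line in lines:
--         low = line.lower()
--         buckets = [
--             b + [line] if len(b) < 8 and any(k in low for k in keys) else b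
--             for b, keys in zip(buckets, _SECTIONS)
--         ]
--
--     def fmt(b):
--         return '- ' + '\n- '.join(b) if b else '- (none detected in sample)'
--
--     return textwrap.dedent(
--         f"""
--         Placeholder health summary (no API key detected). Processed {file_count} PDF file(s).
--
--         High-level overview:
--         - The records include multiple visits and findings. This is only a rough, automated draft.
--
--         Possible diagnoses/assessments noted:
--         {fmt(buckets[0])}
--
--         Possible medications mentioned:
--         {fmt(buckets[1])}
--
--         Possible allergies:
--         {fmt(buckets[2])}
--
--         Possible procedures:
--         {fmt(buckets[3])}
--
--         Next steps:
--         - Provide an OPENAI_API_KEY to enable an AI-generated, plain-language health history summary.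
--         - Verify details directly in the source PDFs before using clinically.
--         """
--     ).strip()
-- ===== Notes on version B (the rewrite author's own statement) =====
-- stated objective: alternative
-- what changed: A runs four separate grep passes over the lines (each lowercasing every line again, collecting all hits, then truncating to 8); B makes one fused pass that lowercases each line once and fills all four buckets simultaneously from a keyword table, capping each bucket at 8 during the scan, and formats each bucket with a single '\n- '.join instead of joining mapped '- '-prefixed items.
import Mathlib
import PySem

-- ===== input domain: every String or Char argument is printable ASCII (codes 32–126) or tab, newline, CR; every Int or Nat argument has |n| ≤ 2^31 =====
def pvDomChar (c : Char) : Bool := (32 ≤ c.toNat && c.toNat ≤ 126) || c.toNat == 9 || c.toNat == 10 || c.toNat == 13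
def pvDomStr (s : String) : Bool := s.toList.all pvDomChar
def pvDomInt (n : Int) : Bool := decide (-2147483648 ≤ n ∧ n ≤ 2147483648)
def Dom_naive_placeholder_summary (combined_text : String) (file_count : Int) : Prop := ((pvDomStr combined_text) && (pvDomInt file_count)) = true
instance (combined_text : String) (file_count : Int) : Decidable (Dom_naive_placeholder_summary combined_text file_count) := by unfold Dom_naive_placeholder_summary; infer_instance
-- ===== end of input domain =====

-- B fuses A's four separate keyword-grep passes into one pass over the lines driven by a
-- keyword table, capping each bucket at 8 during the scan, and formats buckets by a single
-- '\n- ' join (objective: alternative decomposition; same output proved equal).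

-- ===== PORT A =====
-- the four keyword lists of A
def pvKeys1 : List String := ["diag", "dx", "impression", "assessment"]
def pvKeys2 : List String := ["med", "rx", "prescrib", "dosage"]
def pvKeys3 : List String := ["allerg", "reaction"]
def pvKeys4 : List String := ["procedure", "surgery", "operation"]

-- `low = line.lower(); any(k in low for k in keys)`
def pvLineMatch (keys : List String) (line : String) : Bool :=
  let low := PySem.Str.lower line
  keys.any (fun k => PySem.Str.isIn k low)

-- `sample = combined_text[:1200].replace("\n\n", "\n")`; `[l.strip() for l in sample.splitlines() if l.strip()]`
def pvLines (combined_text : String) : List String :=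
  ((PySem.Str.splitlines (PySem.Str.replace (PySem.Str.slice combined_text none (some 1200)) "\n\n" "\n")).map
    PySem.Str.strip).filter (fun l => l ≠ "")

-- A's `grep`: scan all lines, collect every hit, then `hits[:8]`
def pvGrep (lines : List String) (keys : List String) : List String :=
  (lines.foldl (fun hits line => if pvLineMatch keys line then hits ++ [line] else hits) []).take 8

-- `'\n'.join('- ' + d for d in hits) or '- (none detected in sample)'`
def pvBulletText (bucket : List String) : String :=
  let joined := PySem.Str.join "\n" (bucket.map (fun x => "- " ++ x))
  if joined = "" then "- (none detected in sample)" else joined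

-- the f-string template (literal chunks of the triple-quoted string)
def pvTemplate (file_count : Int) (d m a p : String) : String :=
  "\n        Placeholder health summary (no API key detected). Processed "
    ++ PySem.Int.toStr file_count
    ++ " PDF file(s).\n\n        High-level overview:\n        - The records include multiple visits and findings. This is only a rough, automated draft.\n\n        Possible diagnoses/assessments noted:\n        "
    ++ d
    ++ "\n\n        Possible medications mentioned:\n        "
    ++ m
    ++ "\n\n        Possible allergies:\n        "
    ++ a
    ++ "\n\n        Possible procedures:\n        "
    ++ p
    ++ "\n\n        Next steps:\n        - Provide an OPENAI_API_KEY to enable an AI-generated, plain-language health history summary.\n        - Verify details directly in the source PDFs before using clinically.\n        "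

-- ---- hand port of textwrap.dedent (CPython 3.11), exact: whitespace-only lines are
-- blanked, the margin is the longest common [ \t] prefix of the remaining lines
-- (computed with CPython's branch structure), and is stripped from lines that carry it ----
def pvIsWsChar (c : Char) : Bool := c == ' ' || c == '\t'

-- one step of CPython's margin loop
def pvMarginStep (margin? : Option (List Char)) (indent : List Char) : Option (List Char) :=
  match margin? with
  | none => some indent
  | some m =>
    if m.isPrefixOf indent then some m
    else if indent.isPrefixOf m then some indent
    else some (((indent.zip m).takeWhile (fun q => q.1 == q.2)).map (fun q => q.1))

-- text.split('\n'), with `re.sub('^[ \t]+$', '', ...)` applied (blank out ws-only lines)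
def pvBlanked (text : String) : List String :=
  ((PySem.Str.split? text "\n").getD []).map
    (fun l => if !l.toList.isEmpty && l.toList.all pvIsWsChar then "" else l)

-- the `(^[ \t]*)(?:[^ \t\n])` indents: leading whitespace of each non-empty line
def pvIndents (text : String) : List (List Char) :=
  (pvBlanked text).filterMap (fun l => if l = "" then none else some (l.toList.takeWhile pvIsWsChar))

def pvDedent (text : String) : String :=
  match (pvIndents text).foldl pvMarginStep none with
  | none => PySem.Str.join "\n" (pvBlanked text)
  | some m =>
    if m.isEmpty then PySem.Str.join "\n" (pvBlanked text)   -- `if margin:` — empty margin: no sub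
    else
      PySem.Str.join "\n"
        ((pvBlanked text).map (fun l =>
          if m.isPrefixOf l.toList then String.ofList (l.toList.drop m.length) else l))

def naive_placeholder_summary (combined_text : String) (file_count : Int) : String :=
  let lines := pvLines combined_text
  let diagnoses := pvGrep lines pvKeys1
  let meds := pvGrep lines pvKeys2
  let allergies := pvGrep lines pvKeys3
  let procedures := pvGrep lines pvKeys4
  PySem.Str.strip (pvDedent (pvTemplate file_count (pvBulletText diagnoses)
    (pvBulletText meds) (pvBulletText allergies) (pvBulletText procedures)))

-- ===== PORT B =====
-- the `_SECTIONS` keyword table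
def altKeywords : List (List String) :=
  [["diag", "dx", "impression", "assessment"],
   ["med", "rx", "prescrib", "dosage"],
   ["allerg", "reaction"],
   ["procedure", "surgery", "operation"]]

-- `lines = list(filter(None, map(str.strip, sample.splitlines())))`
def altLines (combined_text : String) : List String :=
  ((PySem.Str.splitlines (PySem.Str.replace (PySem.Str.slice combined_text none (some 1200)) "\n\n" "\n")).map
    PySem.Str.strip).filter (fun l => !(l == ""))

-- loop body: lowercase once, extend every still-uncapped bucket whose keywords hit
def altUpd (buckets : List (List String)) (line : String) : List (List String) :=
  let low := PySem.Str.lower line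
  (buckets.zip altKeywords).map (fun bk =>
    if bk.1.length < 8 && bk.2.any (fun k => PySem.Str.isIn k low) then bk.1 ++ [line] else bk.1)

-- `'- ' + '\n- '.join(b) if b else '- (none detected in sample)'`
def altFmt (b : List String) : String :=
  if b.isEmpty then "- (none detected in sample)"
  else "- " ++ PySem.Str.join "\n- " b

-- ---- B's hand port of textwrap.dedent (the same stdlib call), organised as one fold:
-- the margin is the longest common [ \t] prefix, accumulated with an explicit
-- common-prefix recursion while scanning the (blanked) rows ----
def altWs (c : Char) : Bool := c == ' ' || c == '\t'

def altCommonPrefix : List Char → List Char → List Char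
  | a :: as, b :: bs => if a == b then a :: altCommonPrefix as bs else []
  | _, _ => []

def altMarginFold (m? : Option (List Char)) (l : String) : Option (List Char) :=
  if l == "" then m?
  else
    let ind := l.toList.takeWhile altWs
    some (match m? with
          | none => ind
          | some m => altCommonPrefix m ind)

def altRows (text : String) : List String :=
  ((PySem.Str.split? text "\n").getD []).map
    (fun l => if !l.toList.isEmpty && l.toList.all altWs then "" else l)

def altDedent (text : String) : String :=
  match (altRows text).foldl altMarginFold none with
  | none => PySem.Str.join "\n" (altRows text)
  | some [] => PySem.Str.join "\n" (altRows text)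
  | some (c :: m) =>
    PySem.Str.join "\n" ((altRows text).map (fun l =>
      if (c :: m).isPrefixOf l.toList then String.ofList (l.toList.drop (m.length + 1)) else l))

def naive_placeholder_summary_alt (combined_text : String) (file_count : Int) : String :=
  let buckets := (altLines combined_text).foldl altUpd [[], [], [], []]
  PySem.Str.strip (altDedent
    ("\n        Placeholder health summary (no API key detected). Processed "
      ++ PySem.Int.toStr file_count
      ++ " PDF file(s).\n\n        High-level overview:\n        - The records include multiple visits and findings. This is only a rough, automated draft.\n\n        Possible diagnoses/assessments noted:\n        "
      ++ altFmt (buckets.getD 0 [])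
      ++ "\n\n        Possible medications mentioned:\n        "
      ++ altFmt (buckets.getD 1 [])
      ++ "\n\n        Possible allergies:\n        "
      ++ altFmt (buckets.getD 2 [])
      ++ "\n\n        Possible procedures:\n        "
      ++ altFmt (buckets.getD 3 [])
      ++ "\n\n        Next steps:\n        - Provide an OPENAI_API_KEY to enable an AI-generated, plain-language health history summary.\n        - Verify details directly in the source PDFs before using clinically.\n        "))

-- ===== PRECONDITION & SPEC =====
def Spec_naive_placeholder_summary (combined_text : String) (file_count : Int) (out : String) : Prop := out = naive_placeholder_summary_alt combined_text file_count
instance (combined_text : String) (file_count : Int) (out : String) : Decidable (Spec_naive_placeholder_summary combined_text file_count out) := by unfold Spec_naive_placeholder_summary; infer_instance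

-- ===== CLAIM (what is proved, stated in full; the proofs are below) =====
def Claim_equal_naive_placeholder_summary : Prop := ∀ (combined_text : String) (file_count : Int), Dom_naive_placeholder_summary combined_text file_count → Spec_naive_placeholder_summary combined_text file_count (naive_placeholder_summary combined_text file_count)

-- ===== LEMMAS AND PROOFS =====

-- the two line-prefilters agree (the filter predicates are the same test)
theorem alt_lines_eq (c : String) : altLines c = pvLines c := by
  unfold altLines pvLines
  exact List.filter_congr (fun l _ => by by_cases h : l = "" <;> simp [h])

-- proof-side name for B's per-bucket step (what altUpd does to one bucket)
def bstep (keys : List String) (b : List String) (line : String) : List String :=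
  if b.length < 8 && pvLineMatch keys line then b ++ [line] else b

-- B's fused fold is the 4-tuple of independent capped bucket folds
theorem alt_fold (xs : List String) (b1 b2 b3 b4 : List String) :
    xs.foldl altUpd [b1, b2, b3, b4] =
      [xs.foldl (bstep pvKeys1) b1, xs.foldl (bstep pvKeys2) b2,
       xs.foldl (bstep pvKeys3) b3, xs.foldl (bstep pvKeys4) b4] := by
  induction xs generalizing b1 b2 b3 b4 with
  | nil => rfl
  | cons x t ih =>
    have hstep : altUpd [b1, b2, b3, b4] x =
        [bstep pvKeys1 b1 x, bstep pvKeys2 b2 x, bstep pvKeys3 b3 x, bstep pvKeys4 b4 x] := by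
      simp [altUpd, altKeywords, bstep, pvLineMatch, pvKeys1, pvKeys2, pvKeys3, pvKeys4]
    simp only [List.foldl, hstep, ih]

-- each projection: getD on the 4-element literal list
theorem getD0 (a b c d : List String) : [a, b, c, d].getD 0 [] = a := rfl
theorem getD1 (a b c d : List String) : [a, b, c, d].getD 1 [] = b := rfl
theorem getD2 (a b c d : List String) : [a, b, c, d].getD 2 [] = c := rfl
theorem getD3 (a b c d : List String) : [a, b, c, d].getD 3 [] = d := rfl

-- a capped bucket fold collects the first (8 - |acc|) matching lines
theorem bstep_cap (keys : List String) (xs : List String) (acc : List String) :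
    xs.foldl (bstep keys) acc =
      acc ++ ((xs.filter (pvLineMatch keys)).take (8 - acc.length)) := by
  induction xs generalizing acc with
  | nil => simp
  | cons x t ih =>
    simp only [List.foldl, List.filter]
    by_cases hm : pvLineMatch keys x
    · by_cases hlen : acc.length < 8
      · rw [show bstep keys acc x = acc ++ [x] by simp [bstep, hm, hlen]]
        rw [ih]
        simp [hm]
        rw [show 8 - acc.length = (8 - (acc.length + 1)) + 1 by omega]
        simp [List.take_succ_cons]
      · rw [show bstep keys acc x = acc by simp [bstep, hlen]]
        rw [ih]
        rw [show 8 - acc.length = 0 by omega]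
        simp
    · rw [show bstep keys acc x = acc by simp [bstep, hm]]
      rw [ih]
      simp [hm]

-- A's grep is "the first 8 matching lines"
theorem pv_grep_eq (lines keys : List String) :
    pvGrep lines keys = (lines.filter (pvLineMatch keys)).take 8 := by
  unfold pvGrep
  rw [PySem.List.foldl_append_if]
  simp

-- joining '- '-prefixed items with '\n' = '- ' + '\n- '-join (char-list level)
theorem join_bullets_chars (x : List Char) (b : List (List Char)) :
    PySem.Chars.join ['\n'] ((x :: b).map (fun s => ['-', ' '] ++ s)) =
      ['-', ' '] ++ PySem.Chars.join ['\n', '-', ' '] (x :: b) := by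
  induction b generalizing x with
  | nil => simp [PySem.Chars.join_singleton]
  | cons y t ih =>
    have hL : (x :: y :: t).map (fun s => ['-', ' '] ++ s)
        = (['-', ' '] ++ x) :: (y :: t).map (fun s => ['-', ' '] ++ s) := rfl
    have hL2 : (y :: t).map (fun s => ['-', ' '] ++ s)
        = (['-', ' '] ++ y) :: t.map (fun s => ['-', ' '] ++ s) := rfl
    rw [hL, hL2, PySem.Chars.join_cons_cons, ← hL2, ih y, PySem.Chars.join_cons_cons]
    simp

-- the two bucket formatters agree
theorem fmt_eq (b : List String) : pvBulletText b = altFmt b := by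
  unfold pvBulletText altFmt
  cases b with
  | nil => rfl
  | cons x t =>
    have hcomp : (String.toList ∘ fun s : String => "- " ++ s)
        = ((fun s : List Char => '-' :: ' ' :: s) ∘ String.toList) := by
      funext s; simp [Function.comp]
    have hj : PySem.Str.join "\n" ((x :: t).map (fun s => "- " ++ s)) =
        "- " ++ PySem.Str.join "\n- " (x :: t) := by
      apply String.ext
      simpa [hcomp] using join_bullets_chars x.toList (t.map String.toList)
    rw [hj]
    have hne : ("- " ++ PySem.Str.join "\n- " (x :: t)) ≠ "" := by
      intro h
      have := congrArg String.toList h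
      simp at this
    simp [hne]

-- altCommonPrefix of a list prefix is that prefix
theorem cp_left (a b : List Char) (h : a.isPrefixOf b = true) : altCommonPrefix a b = a := by
  induction a generalizing b with
  | nil => cases b <;> rfl
  | cons x as ih =>
    cases b with
    | nil => simp [List.isPrefixOf] at h
    | cons y bs =>
      simp only [List.isPrefixOf, Bool.and_eq_true, beq_iff_eq] at h
      simp [altCommonPrefix, h.1, ih bs h.2]

theorem cp_right (a b : List Char) (h : b.isPrefixOf a = true) : altCommonPrefix a b = b := by
  induction a generalizing b with
  | nil => cases b with
    | nil => rfl
    | cons y bs => simp [List.isPrefixOf] at h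
  | cons x as ih =>
    cases b with
    | nil => rfl
    | cons y bs =>
      simp only [List.isPrefixOf, Bool.and_eq_true, beq_iff_eq] at h
      simp [altCommonPrefix, h.1, ih bs h.2]

-- altCommonPrefix as the zip/takeWhile CPython expression (note the swapped zip order)
theorem cp_zip (a b : List Char) :
    altCommonPrefix a b = ((b.zip a).takeWhile (fun q => q.1 == q.2)).map (fun q => q.1) := by
  induction a generalizing b with
  | nil => cases b <;> rfl
  | cons x as ih =>
    cases b with
    | nil => rfl
    | cons y bs =>
      by_cases h : x = y
      · subst h
        simp [altCommonPrefix, List.zip, ih bs]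
      · have h' : (x == y) = false := by simp [h]
        have h'' : (y == x) = false := by
          simp only [beq_eq_false_iff_ne, ne_eq]
          exact fun e => h e.symm
        simp [altCommonPrefix, List.zip, h', h'']

-- one B margin step = one CPython margin step
theorem marginstep_eq (m i : List Char) :
    pvMarginStep (some m) i = some (altCommonPrefix m i) := by
  show (if m.isPrefixOf i then some m
        else if i.isPrefixOf m then some i
        else some (((i.zip m).takeWhile (fun q => q.1 == q.2)).map (fun q => q.1)))
      = some (altCommonPrefix m i)
  split_ifs with h1 h2
  · rw [cp_left m i h1]
  · rw [cp_right m i h2]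
  · rw [cp_zip]

-- B's single margin fold over the rows = A's fold over the filterMapped indents
theorem marginfold_eq (rows : List String) (m? : Option (List Char)) :
    rows.foldl altMarginFold m? =
      (rows.filterMap (fun l =>
        if l = "" then none else some (l.toList.takeWhile pvIsWsChar))).foldl pvMarginStep m? := by
  induction rows generalizing m? with
  | nil => rfl
  | cons l t ih =>
    have hws : altWs = pvIsWsChar := rfl
    by_cases h : l = ""
    · subst h
      have e1 : altMarginFold m? "" = m? := by simp [altMarginFold]
      simp [List.foldl_cons, e1, ih]
    · have hstep : altMarginFold m? l = pvMarginStep m? (l.toList.takeWhile pvIsWsChar) := by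
        cases m? with
        | none => simp [altMarginFold, h, pvMarginStep, hws]
        | some m => simp [altMarginFold, h, hws, marginstep_eq]
      simp [List.foldl_cons, h, hstep, ih]

-- the two dedent ports agree
theorem dedent_eq (t : String) : altDedent t = pvDedent t := by
  unfold altDedent pvDedent
  rw [show altRows t = pvBlanked t from rfl]
  rw [show (pvBlanked t).foldl altMarginFold none = (pvIndents t).foldl pvMarginStep none from
    by rw [marginfold_eq]; rfl]
  cases hm : (pvIndents t).foldl pvMarginStep none with
  | none => rfl
  | some m =>
    cases m with
    | nil => rfl
    | cons c cs => simp

-- ===== VERDICT (by name: the statement is the Claim_ definition above) =====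
theorem naive_placeholder_summary_spec : Claim_equal_naive_placeholder_summary := by
  intro combined_text file_count _
  unfold Spec_naive_placeholder_summary
  unfold naive_placeholder_summary naive_placeholder_summary_alt pvTemplate
  rw [alt_lines_eq, alt_fold]
  simp only [getD0, getD1, getD2, getD3, bstep_cap, pv_grep_eq, ← fmt_eq, dedent_eq,
    List.nil_append, List.length_nil, Nat.sub_zero]
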